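-- pv_equiv track=rewrite | github.com/Peterg101/shopify-redux | generation_service/cad/converter.py | _reorder_steps
-- ===== SOURCE A (Python) =====
-- PHASE_ORDER = {
--     "create_box": 0,
--     "create_cylinder": 0,
--     "extrude_profile": 1,
--     "union": 1,
--     "revolve": 1,
--     "mirror": 1,
--     "shell": 2,
--     "cut_blind": 3,
--     "cut_through": 3,
--     "holes": 3,
--     "fillet": 5,
--     "chamfer": 5,
-- }
--
-- def _reorder_steps(steps: list[dict]) -> list[dict]:
--     """Reorder steps to ensure correct execution sequence.
--
--     Ordering rules:
--       Phase 0: Base solid (create_box, create_cylinder) — must be first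
--       Phase 1: Additive ops (extrude_profile, union, revolve, mirror)
--       Phase 2: Shell (must come before cuts)
--       Phase 3: Subtractive ops (cut_blind, cut_through, holes)
--       Phase 5: Cosmetic ops (fillet, chamfer) — always last
--
--     Within each phase, original order is preserved (stable sort).
--     """
--     def sort_key(step: dict) -> tuple[int, int]:
--         op = step.get("op", "")
--         phase = PHASE_ORDER.get(op, 4)
--         # Use the original index as tiebreaker for stability
--         return (phase, step.get("_original_index", 0))
--
--     # Tag each step with its original index for stable sorting
--     for i, step in enumerate(steps):
--         step["_original_index"] = i
--
--     ordered = sorted(steps, key=sort_key)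
--
--     # Clean up the temporary index
--     for step in ordered:
--         step.pop("_original_index", None)
--
--     return ordered
-- ===== SOURCE B (Python) =====
-- PHASE_ORDER = {
--     "create_box": 0,
--     "create_cylinder": 0,
--     "extrude_profile": 1,
--     "union": 1,
--     "revolve": 1,
--     "mirror": 1,
--     "shell": 2,
--     "cut_blind": 3,
--     "cut_through": 3,
--     "holes": 3,
--     "fillet": 5,
--     "chamfer": 5,
-- }
--
-- def _reorder_steps(steps: list[dict]) -> list[dict]:
--     """Single linear pass per phase bucket: no sorting, no tagging, no mutation.
--
--     Phases are the fixed values 0..5; collecting the steps of each phase in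
--     input order is exactly a stable sort by phase.
--     """
--     return [step
--             for phase in (0, 1, 2, 3, 4, 5)
--             for step in steps
--             if PHASE_ORDER.get(step.get("op", ""), 4) == phase]
-- ===== Notes on version B (the rewrite author's own statement) =====
-- stated objective: simpler
-- what changed: Replaces A's tag-with-index / stable-sort / untag pipeline with one filtering pass per fixed phase bucket 0..5 (concatenating the buckets is exactly the stable sort by phase), with no mutation of the input dicts.
import Mathlib
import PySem

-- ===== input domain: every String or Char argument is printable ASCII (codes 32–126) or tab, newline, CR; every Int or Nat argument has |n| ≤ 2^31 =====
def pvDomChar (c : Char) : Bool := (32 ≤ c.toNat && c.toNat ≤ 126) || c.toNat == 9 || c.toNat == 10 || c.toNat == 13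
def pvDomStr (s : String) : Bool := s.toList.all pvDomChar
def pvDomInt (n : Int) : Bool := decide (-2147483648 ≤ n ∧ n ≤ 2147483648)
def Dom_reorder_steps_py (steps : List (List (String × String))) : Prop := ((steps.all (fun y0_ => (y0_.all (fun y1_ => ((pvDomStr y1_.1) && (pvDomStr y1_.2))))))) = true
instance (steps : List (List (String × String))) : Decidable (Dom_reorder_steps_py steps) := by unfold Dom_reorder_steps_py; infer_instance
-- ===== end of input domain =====

-- B replaces A's tag-sort-untag (stable sort by phase) with one filtering pass per fixed phase
-- bucket 0..5 (objective: simpler).  Equivalence is about the RETURN value only: Python A also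
-- mutates the input dicts in place (it temporarily adds "_original_index" and pops it again).

-- ===== PORT A =====
def PHASE_ORDER : PySem.Dict String Int := PySem.Dict.ofList
  [("create_box", 0), ("create_cylinder", 0),
   ("extrude_profile", 1), ("union", 1), ("revolve", 1), ("mirror", 1),
   ("shell", 2),
   ("cut_blind", 3), ("cut_through", 3), ("holes", 3),
   ("fillet", 5), ("chamfer", 5)]

-- Python stores the int tag i into the (string-valued) dict; the String dict of the type
-- convention cannot hold an int, so the port stores str(i) in the dict (the value is only
-- ever erased again) and carries the int i alongside; sort_key reads the carried i, which is
-- exactly the value step.get("_original_index", 0) returns in Python after the tagging loop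
-- (the tagging loop overwrites any pre-existing value with i).
def reorder_steps_py (steps : List (List (String × String))) : List (List (String × String)) :=
  let tagged := (PySem.List.enumerate steps).map
    (fun p => ((PySem.Dict.mk p.2).insert "_original_index" (PySem.Int.toStr p.1), p.1))
  let ordered := PySem.List.sorted2 tagged
    (fun t => PySem.Dict.getD PHASE_ORDER (PySem.Dict.getD t.1 "op" "") 4)
    (fun t => t.2)
  ordered.map (fun t => (t.1.erase "_original_index").items)

-- ===== PORT B =====
def phaseB (step : List (String × String)) : Int :=
  PySem.Dict.getD PHASE_ORDER (PySem.Dict.getD (PySem.Dict.mk step) "op" "") 4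

def reorder_steps_py_alt (steps : List (List (String × String))) : List (List (String × String)) :=
  ([0, 1, 2, 3, 4, 5] : List Int).flatMap
    (fun phase => steps.filter (fun step => phaseB step == phase))

-- ===== PRECONDITION & SPEC =====
-- Pre_ excludes inputs in which a step already contains the key "_original_index": that key is
-- reserved by A as its temporary tag, and on such steps A returns the step with that entry
-- deleted while B returns it unchanged — behaviour on the reserved key is anybody's choice,
-- so those inputs are left outside the claim.  (A raises on no input: Pre_ excludes nothing else.)
def Pre_reorder_steps_py (steps : List (List (String × String))) : Prop :=
  (steps.all (fun s => s.all (fun p => !(p.1 == "_original_index")))) = true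
instance (steps : List (List (String × String))) : Decidable (Pre_reorder_steps_py steps) := by unfold Pre_reorder_steps_py; infer_instance

def pvWitness_reorder_steps_py : (List (List (String × String))) :=
  [[("op", "fillet"), ("size", "2")], [("op", "create_box")]]

def Spec_reorder_steps_py (steps : List (List (String × String))) (out : List (List (String × String))) : Prop := out = reorder_steps_py_alt steps
instance (steps : List (List (String × String))) (out : List (List (String × String))) : Decidable (Spec_reorder_steps_py steps out) := by unfold Spec_reorder_steps_py; infer_instance

-- ===== CLAIM (what is proved, stated in full; the proofs are below) =====
def Claim_equal_reorder_steps_py : Prop := ∀ (steps : List (List (String × String))), Dom_reorder_steps_py steps → Pre_reorder_steps_py steps → Spec_reorder_steps_py steps (reorder_steps_py steps)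

-- ===== LEMMAS AND PROOFS =====

theorem insertBy_cons {α : Type} (b : α → α → Bool) (x y : α) (ys : List α) :
    PySem.List.insertBy b x (y :: ys) =
      if b x y then x :: y :: ys else y :: PySem.List.insertBy b x ys := by
  simp [PySem.List.insertBy]

theorem insertBy_congr {α : Type} (b1 b2 : α → α → Bool) (x : α) (acc : List α)
    (h : ∀ a ∈ acc, b1 x a = b2 x a) :
    PySem.List.insertBy b1 x acc = PySem.List.insertBy b2 x acc := by
  induction acc with
  | nil => rfl
  | cons y ys ih =>
    rw [insertBy_cons, insertBy_cons, h y (by simp),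
      ih (fun a ha => h a (by simp [ha]))]

theorem foldl_insertBy_congr {α : Type} (b1 b2 : α → α → Bool) (P : α → Prop)
    (hb : ∀ x y, P x → P y → b1 x y = b2 x y) :
    ∀ (xs acc : List α), (∀ x ∈ xs, P x) → (∀ a ∈ acc, P a) →
      xs.foldl (fun acc x => PySem.List.insertBy b1 x acc) acc =
      xs.foldl (fun acc x => PySem.List.insertBy b2 x acc) acc := by
  intro xs
  induction xs with
  | nil => intro acc _ _; rfl
  | cons x t ih =>
    intro acc hxs hacc
    simp only [List.foldl_cons]
    rw [insertBy_congr b1 b2 x acc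
      (fun a ha => hb x a (hxs x (by simp)) (hacc a ha))]
    exact ih _ (fun z hz => hxs z (by simp [hz]))
      (fun a ha => ((PySem.List.mem_insertBy b2 x a acc).mp ha).elim
        (fun he => he ▸ hxs x (by simp)) (hacc a))

theorem encode_lt {n a b c d : Int} (hb : 0 ≤ b) (hbn : b < n) (hd : 0 ≤ d)
    (h : a < c) : a * n + b < c * n + d := by nlinarith

theorem lt2_eq_encode {n : Int} (k1 k2 : Int) (c d : Int)
    (hb : 0 ≤ k2) (hbn : k2 < n) (hd : 0 ≤ d) (hdn : d < n) :
    (decide (k1 < c) || !decide (c < k1) && decide (k2 < d)) =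
      decide (k1 * n + k2 < c * n + d) := by
  rcases lt_trichotomy k1 c with h | h | h
  · simp only [decide_eq_true h, Bool.true_or]
    exact (decide_eq_true (encode_lt hb hbn hd h)).symm
  · subst h
    simp only [lt_irrefl, decide_false, Bool.false_or, Bool.not_false, Bool.true_and]
    have : (k1 * n + k2 < k1 * n + d) ↔ (k2 < d) := by omega
    simp [this]
  · simp only [decide_eq_true h, Bool.not_true, Bool.false_and, Bool.or_false]
    have : ¬ (k1 * n + k2 < c * n + d) := by nlinarith
    simp [not_lt_of_gt h, this]

theorem count_flatMap_filter {α : Type} [BEq α] [LawfulBEq α] (g : α → Int) (a : α) :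
    ∀ (ps : List Int), ps.Nodup → ∀ (l : List α),
      List.count a (ps.flatMap (fun p => l.filter (fun x => g x == p))) =
        if g a ∈ ps then List.count a l else 0 := by
  intro ps
  induction ps with
  | nil => intro _ l; simp
  | cons p ps ih =>
    intro hnd l
    simp only [List.flatMap_cons, List.count_append]
    rw [ih hnd.of_cons l]
    by_cases hp : g a = p
    · rw [List.count_filter (by simp [hp])]
      have hni : g a ∉ ps := hp ▸ (List.nodup_cons.mp hnd).1
      rw [hp] at hni
      simp [hp, hni]
    · have h0 : List.count a (l.filter (fun x => g x == p)) = 0 :=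
        List.count_eq_zero.mpr (by simp [List.mem_filter, hp])
      simp [h0, hp]

theorem flatMap_filter_perm {α : Type} [BEq α] [LawfulBEq α] (g : α → Int)
    (ps : List Int) (hnd : ps.Nodup) (l : List α) (hmem : ∀ x ∈ l, g x ∈ ps) :
    (ps.flatMap (fun p => l.filter (fun x => g x == p))).Perm l := by
  rw [List.perm_iff_count]
  intro a
  rw [count_flatMap_filter g a ps hnd l]
  by_cases h : g a ∈ ps
  · simp [h]
  · have : List.count a l = 0 :=
      List.count_eq_zero.mpr (fun ha => h (hmem a ha))
    simp [h, this]

theorem pairwise_flatMap_filter {α : Type} (R : α → α → Prop) (R0 : α → α → Prop)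
    (g : α → Int) (l : List α) (hl : l.Pairwise R0)
    (h1 : ∀ q ∈ l, ∀ r ∈ l, R0 q r → g q = g r → R q r)
    (h2 : ∀ q ∈ l, ∀ r ∈ l, g q < g r → R q r) :
    ∀ ps : List Int, ps.Pairwise (· < ·) →
      List.Pairwise R (ps.flatMap (fun p => l.filter (fun x => g x == p))) := by
  intro ps
  induction ps with
  | nil => intro _; simp
  | cons p ps ih =>
    intro hps
    simp only [List.flatMap_cons]
    rw [List.pairwise_append]
    refine ⟨?_, ih (List.Pairwise.of_cons hps), ?_⟩
    · refine (hl.filter _).imp_of_mem ?_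
      intro a b ha hb hr
      have ha' := List.mem_filter.mp ha
      have hb' := List.mem_filter.mp hb
      exact h1 a ha'.1 b hb'.1 hr
        (by have := ha'.2; have := hb'.2; simp_all)
    · intro a ha b hb
      have ha' := List.mem_filter.mp ha
      rcases List.mem_flatMap.mp hb with ⟨p', hp', hb'⟩
      have hb'' := List.mem_filter.mp hb'
      apply h2 a ha'.1 b hb''.1
      have hga : g a = p := by simpa using ha'.2
      have hgb : g b = p' := by simpa using hb''.2
      have : p < p' := (List.pairwise_cons.mp hps).1 p' hp'
      omega

theorem phase_bound (op : String) :
    0 ≤ PySem.Dict.getD PHASE_ORDER op 4 ∧ PySem.Dict.getD PHASE_ORDER op 4 ≤ 5 := by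
  have hit : PHASE_ORDER.items =
    [("create_box", 0), ("create_cylinder", 0),
     ("extrude_profile", 1), ("union", 1), ("revolve", 1), ("mirror", 1),
     ("shell", 2),
     ("cut_blind", 3), ("cut_through", 3), ("holes", 3),
     ("fillet", 5), ("chamfer", 5)] := by decide
  simp only [PySem.Dict.getD, PySem.Dict.get?, hit]
  cases h : List.find? (fun p => p.1 == op)
      ([("create_box", 0), ("create_cylinder", 0),
     ("extrude_profile", 1), ("union", 1), ("revolve", 1), ("mirror", 1),
     ("shell", 2),
     ("cut_blind", 3), ("cut_through", 3), ("holes", 3),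
     ("fillet", 5), ("chamfer", 5)] : List (String × Int)) with
  | none => simp
  | some pr =>
    have := List.mem_of_find?_eq_some h
    simp only [List.mem_cons, List.not_mem_nil, or_false] at this
    rcases this with h|h|h|h|h|h|h|h|h|h|h|h <;> subst h <;> simp

theorem tag_k1 (i : Int) (s : List (String × String)) :
    PySem.Dict.getD PHASE_ORDER
      (PySem.Dict.getD ((PySem.Dict.mk s).insert "_original_index" (PySem.Int.toStr i)) "op" "") 4
      = phaseB s := by
  unfold phaseB
  congr 1
  unfold PySem.Dict.getD
  rw [PySem.Dict.get?_insert_of_ne _ _ (by decide)]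

theorem erase_insert_items (i : Int) (s : List (String × String))
    (h : ∀ p ∈ s, ¬ p.1 = "_original_index") :
    (((PySem.Dict.mk s).insert "_original_index" (PySem.Int.toStr i)).erase "_original_index").items = s := by
  have hc : (PySem.Dict.mk s).contains "_original_index" = false := by
    simp only [PySem.Dict.contains, List.any_eq_false]
    intro p hp; simpa using h p hp
  simp only [PySem.Dict.insert, hc, Bool.false_eq_true, if_false, PySem.Dict.erase,
    List.filter_append]
  have h1 : List.filter (fun p => !p.1 == "_original_index") s = s :=
    List.filter_eq_self.mpr (fun p hp => by simpa using h p hp)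
  simp [h1]

theorem main_lemma (steps : List (List (String × String)))
    (h : ∀ s ∈ steps, ∀ p ∈ s, ¬ p.1 = "_original_index") :
    reorder_steps_py steps = reorder_steps_py_alt steps := by
  unfold reorder_steps_py reorder_steps_py_alt
  set n : Int := (steps.length : Int) with hn
  set E := PySem.List.enumerate steps 0 with hE
  set tagf : Int × List (String × String) → PySem.Dict String String × Int :=
    fun p => ((PySem.Dict.mk p.2).insert "_original_index" (PySem.Int.toStr p.1), p.1) with htagf
  set k1 : PySem.Dict String String × Int → Int :=
    fun t => PySem.Dict.getD PHASE_ORDER (PySem.Dict.getD t.1 "op" "") 4 with hk1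
  set f : PySem.Dict String String × Int → Int := fun t => k1 t * n + t.2 with hf
  set gE : Int × List (String × String) → Int := fun q => phaseB q.2 with hgE
  set yE : List (Int × List (String × String)) :=
    ([0, 1, 2, 3, 4, 5] : List Int).flatMap (fun p => E.filter (fun x => gE x == p)) with hyE
  have hmemE : ∀ q ∈ E, 0 ≤ q.1 ∧ q.1 < n ∧ q.2 ∈ steps := by
    intro q hq
    rcases (PySem.List.mem_enumerate_iff steps 0 q).mp hq with ⟨k, hk, rfl⟩
    refine ⟨by simp, by simp; omega, by simp⟩
  have htagk1 : ∀ q : Int × List (String × String), k1 (tagf q) = phaseB q.2 := by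
    intro q; exact tag_k1 q.1 q.2
  -- step 1: sorted2 with the tuple key = sorted with the encoded key
  have step1 : PySem.List.sorted2 (E.map tagf) k1 (fun t => t.2) =
      PySem.List.sorted (E.map tagf) f := by
    rw [PySem.List.sorted_eq_foldl_insertBy]
    refine foldl_insertBy_congr _ _ (fun t => 0 ≤ t.2 ∧ t.2 < n) ?_ _ _ ?_ (by simp)
    · intro x y hx hy
      exact lt2_eq_encode (k1 x) x.2 (k1 y) y.2 hx.1 hx.2 hy.1 hy.2
    · intro x hx
      rcases List.mem_map.mp hx with ⟨q, hq, rfl⟩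
      have := hmemE q hq
      exact ⟨this.1, this.2.1⟩
  -- step 2: the sorted list is yE mapped through tagf
  have step2 : PySem.List.sorted (E.map tagf) f = yE.map tagf := by
    apply PySem.List.sorted_eq_of_perm_of_pairwise_lt
    · rw [hyE]
      exact (flatMap_filter_perm gE [0, 1, 2, 3, 4, 5] (by decide) E
        (fun x _ => by
          have := phase_bound (PySem.Dict.getD (PySem.Dict.mk x.2) "op" "")
          simp only [hgE, phaseB]
          simp only [List.mem_cons, List.not_mem_nil, or_false]
          omega)).map tagf
    · rw [List.pairwise_map]
      refine pairwise_flatMap_filter _ (fun q r => q.1 < r.1) gE E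
        (PySem.List.pairwise_lt_enumerate steps 0) ?_ ?_ [0, 1, 2, 3, 4, 5] (by decide)
      · intro q hq r hr hlt heq
        simp only [hf]
        have : k1 (tagf q) = k1 (tagf r) := by rw [htagk1 q, htagk1 r]; exact heq
        calc k1 (tagf q) * n + q.1 < k1 (tagf q) * n + r.1 := by omega
          _ = k1 (tagf r) * n + r.1 := by rw [this]
      · intro q hq r hr hlt
        simp only [hf]
        have hq' := hmemE q hq
        have hr' := hmemE r hr
        have : k1 (tagf q) < k1 (tagf r) := by
          rw [htagk1 q, htagk1 r]; exact hlt
        exact encode_lt hq'.1 hq'.2.1 hr'.1 this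
  show List.map (fun t => (t.1.erase "_original_index").items)
      (PySem.List.sorted2 (List.map tagf E) k1 (fun t => t.2)) =
    List.flatMap (fun phase => List.filter (fun step => phaseB step == phase) steps)
      [0, 1, 2, 3, 4, 5]
  rw [step1, step2, List.map_map]
  -- step 3: untagging gives back the original dicts, bucket by bucket
  rw [hyE, List.map_flatMap]
  apply List.flatMap_congr
  intro p _
  have huntag : List.map ((fun t : PySem.Dict String String × Int =>
        (t.1.erase "_original_index").items) ∘ tagf) (E.filter (fun x => gE x == p)) =
      List.map (fun q => q.2) (E.filter (fun x => gE x == p)) := by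
    apply List.map_congr_left
    intro q hq
    have hqE : q ∈ E := (List.mem_filter.mp hq).1
    exact erase_insert_items q.1 q.2 (h q.2 (hmemE q hqE).2.2)
  rw [huntag]
  conv_rhs => rw [← PySem.List.map_snd_enumerate steps 0]
  rw [List.filter_map]
  rfl

-- ===== VERDICT (by name: the statement is the Claim_ definition above) =====
theorem reorder_steps_py_spec : Claim_equal_reorder_steps_py := by
  intro steps _ hPre
  apply main_lemma
  intro s hs p hp hkey
  unfold Pre_reorder_steps_py at hPre
  simp only [List.all_eq_true] at hPre
  have := hPre s hs p hp
  simp [hkey] at this
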